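-- pv_equiv track=rewrite | github.com/idllresearch/malicious-gpt | quality/script_for_intermediary_result/flowgpt/sumSyntax.py | checkOneLine
-- ===== SOURCE A (Python) =====
-- def checkOneLine(line_list):
--     judgements = []
--     for line in line_list:
--         if "C_mal_syntax" in line:
--             judgements.append(line["C_mal_syntax"])
--         elif "web_syntax" in line:
--             judgements.append(line["web_syntax"])
--         elif "python_mal_syntax" in line:
--             judgements.append(line["python_mal_syntax"])
--
--     if judgements == []:
--         final = "undetected"
--         return final
--
--     if "pass" in judgements:
--         final = "pass"
--     elif "error" in judgements:
--         final = "error"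
--     else:
--         final = "NoCode"
--     return final
-- ===== SOURCE B (Python) =====
-- def checkOneLine(line_list):
--     rank = 0  # 0 = nothing recorded, 1 = NoCode tier, 2 = error, 3 = pass
--     for line in line_list:
--         j = None
--         for key in ("C_mal_syntax", "web_syntax", "python_mal_syntax"):
--             if key in line:
--                 j = line[key]
--                 break
--         if j is None:
--             continue
--         r = 3 if j == "pass" else 2 if j == "error" else 1
--         if r > rank:
--             rank = r
--     if rank == 3:
--         return "pass"
--     if rank == 2:
--         return "error"
--     if rank == 1:
--         return "NoCode"
--     return "undetected"
-- ===== Notes on version B (the rewrite author's own statement) =====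
-- stated objective: simpler
-- what changed: Single pass keeping a running max priority rank (pass>error>other) instead of collecting a judgements list and re-scanning it with membership tests.
import Mathlib
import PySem

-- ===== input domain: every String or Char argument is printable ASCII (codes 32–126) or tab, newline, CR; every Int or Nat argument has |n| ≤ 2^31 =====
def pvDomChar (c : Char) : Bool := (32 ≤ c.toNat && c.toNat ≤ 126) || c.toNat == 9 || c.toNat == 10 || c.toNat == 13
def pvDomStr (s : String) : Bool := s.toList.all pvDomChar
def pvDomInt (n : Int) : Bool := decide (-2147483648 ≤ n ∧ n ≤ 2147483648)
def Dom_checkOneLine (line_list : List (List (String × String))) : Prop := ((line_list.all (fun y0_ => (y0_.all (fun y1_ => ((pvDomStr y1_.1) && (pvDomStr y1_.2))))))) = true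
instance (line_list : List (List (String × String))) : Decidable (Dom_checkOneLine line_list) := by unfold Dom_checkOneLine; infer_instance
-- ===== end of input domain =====

-- B replaces A's collected judgements list and its two membership re-scans by a single
-- pass keeping a running max priority rank (pass > error > other), translated at the end
-- (objective: simpler, constant space).

-- ===== PORT A =====
def checkOneLine (line_list : List (List (String × String))) : String :=
  let judgements := line_list.foldl (fun acc line =>
    match (PySem.Dict.mk line).get? "C_mal_syntax" with
    | some v => acc ++ [v]
    | none =>
      match (PySem.Dict.mk line).get? "web_syntax" with
      | some v => acc ++ [v]
      | none =>
        match (PySem.Dict.mk line).get? "python_mal_syntax" with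
        | some v => acc ++ [v]
        | none => acc) []
  if judgements = [] then "undetected"
  else if judgements.contains "pass" then "pass"
  else if judgements.contains "error" then "error"
  else "NoCode"

-- ===== PORT B =====
-- B's inner key loop: first of the three keys present in the line, else none
def pickJudge (line : List (String × String)) : Option String :=
  match (PySem.Dict.mk line).get? "C_mal_syntax" with
  | some v => some v
  | none =>
    match (PySem.Dict.mk line).get? "web_syntax" with
    | some v => some v
    | none => (PySem.Dict.mk line).get? "python_mal_syntax"

-- B's 'r = 3 if j == "pass" else 2 if j == "error" else 1'
def rankOf (j : String) : Nat := if j = "pass" then 3 else if j = "error" then 2 else 1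

def checkOneLine_alt (line_list : List (List (String × String))) : String :=
  let rank := line_list.foldl (fun rank line =>
    match pickJudge line with
    | none => rank
    | some j => let r := rankOf j; if r > rank then r else rank) 0
  if rank = 3 then "pass"
  else if rank = 2 then "error"
  else if rank = 1 then "NoCode"
  else "undetected"

-- ===== PRECONDITION & SPEC =====
def Spec_checkOneLine (line_list : List (List (String × String))) (out : String) : Prop := out = checkOneLine_alt line_list
instance (line_list : List (List (String × String))) (out : String) : Decidable (Spec_checkOneLine line_list out) := by unfold Spec_checkOneLine; infer_instance

-- ===== CLAIM (what is proved, stated in full; the proofs are below) =====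
def Claim_equal_checkOneLine : Prop := ∀ (line_list : List (List (String × String))), Dom_checkOneLine line_list → Spec_checkOneLine line_list (checkOneLine line_list)

-- ===== LEMMAS AND PROOFS =====

-- closed form of B's running rank over a list of judgements
def closedRank (js : List String) : Nat :=
  if "pass" ∈ js then 3 else if "error" ∈ js then 2 else if js = [] then 0 else 1

lemma closedRank_cons (j : String) (t : List String) :
    closedRank (j :: t) = max (rankOf j) (closedRank t) := by
  simp only [closedRank, rankOf, List.mem_cons]
  split_ifs <;> simp_all

-- A's per-line step, phrased through pickJudge
lemma step_eq (acc : List String) (line : List (String × String)) :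
    (match (PySem.Dict.mk line).get? "C_mal_syntax" with
     | some v => acc ++ [v]
     | none =>
       match (PySem.Dict.mk line).get? "web_syntax" with
       | some v => acc ++ [v]
       | none =>
         match (PySem.Dict.mk line).get? "python_mal_syntax" with
         | some v => acc ++ [v]
         | none => acc)
    = (match pickJudge line with
       | some v => acc ++ [v]
       | none => acc) := by
  unfold pickJudge
  cases (PySem.Dict.mk line).get? "C_mal_syntax" <;>
    cases (PySem.Dict.mk line).get? "web_syntax" <;>
    cases (PySem.Dict.mk line).get? "python_mal_syntax" <;> rfl

-- A's loop collects exactly the filterMap of pickJudge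
lemma judgements_eq (l : List (List (String × String))) (acc : List String) :
    l.foldl (fun acc line =>
      match (PySem.Dict.mk line).get? "C_mal_syntax" with
      | some v => acc ++ [v]
      | none =>
        match (PySem.Dict.mk line).get? "web_syntax" with
        | some v => acc ++ [v]
        | none =>
          match (PySem.Dict.mk line).get? "python_mal_syntax" with
          | some v => acc ++ [v]
          | none => acc) acc = acc ++ l.filterMap pickJudge := by
  induction l generalizing acc with
  | nil => simp
  | cons h t ih =>
    rw [List.foldl_cons, List.filterMap_cons]
    show List.foldl _ (match (PySem.Dict.mk h).get? "C_mal_syntax" with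
      | some v => acc ++ [v]
      | none =>
        match (PySem.Dict.mk h).get? "web_syntax" with
        | some v => acc ++ [v]
        | none =>
          match (PySem.Dict.mk h).get? "python_mal_syntax" with
          | some v => acc ++ [v]
          | none => acc) t = _
    rw [step_eq]
    cases hp : pickJudge h <;> simp [ih]

-- B's loop is the rank-fold over the same filterMap
lemma rank_fold_eq (l : List (List (String × String))) (r : Nat) :
    l.foldl (fun rank line =>
      match pickJudge line with
      | none => rank
      | some j => let r := rankOf j; if r > rank then r else rank) r
    = (l.filterMap pickJudge).foldl (fun rank j => if rankOf j > rank then rankOf j else rank) r := by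
  induction l generalizing r with
  | nil => rfl
  | cons h t ih =>
    simp only [List.foldl_cons, List.filterMap_cons]
    cases pickJudge h <;> simp [ih]

-- the rank-fold computes the closed form
lemma rank_fold_closed (js : List String) (r : Nat) :
    js.foldl (fun rank j => if rankOf j > rank then rankOf j else rank) r = max r (closedRank js) := by
  induction js generalizing r with
  | nil => simp [closedRank]
  | cons j t ih =>
    simp only [List.foldl_cons]
    rw [ih, closedRank_cons]
    have h : (if rankOf j > r then rankOf j else r) = max r (rankOf j) := by split <;> omega
    rw [h, Nat.max_assoc]

-- ===== VERDICT (by name: the statement is the Claim_ definition above) =====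
theorem checkOneLine_spec : Claim_equal_checkOneLine := by
  intro line_list _
  show checkOneLine line_list = checkOneLine_alt line_list
  unfold checkOneLine checkOneLine_alt
  rw [judgements_eq, rank_fold_eq, rank_fold_closed]
  simp only [List.nil_append, Nat.zero_max]
  set js := line_list.filterMap pickJudge with hjs
  by_cases hp : "pass" ∈ js
  · have hne : js ≠ [] := by intro h; simp [h] at hp
    simp [closedRank, hp, hne]
  · by_cases he : "error" ∈ js
    · have hne : js ≠ [] := by intro h; simp [h] at he
      simp [closedRank, hp, he, hne]
    · by_cases hn : js = []
      · simp [closedRank, hn]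
      · simp [closedRank, hp, he, hn]
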